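-- pv_equiv track=rewrite | github.com/borrascador/griddage | card.py | score_fifteens
-- ===== SOURCE A (Python) =====
-- from itertools import cycle, combinations
--
-- def score_fifteens(values):
--     fifteens = 0
--     for combo_length in range(1,6):
--         for combo in combinations(values, combo_length):
--             if sum(combo) == 15:
--                 fifteens += 1
--     score = 2 * fifteens
--     return score
-- ===== SOURCE B (Python) =====
-- def score_fifteens(values):
--     def count(vs, k, t):
--         # number of size-k subsequences of vs summing to t
--         if k == 0:
--             return 1 if t == 0 else 0
--         if not vs:
--             return 0
--         return count(vs[1:], k - 1, t - vs[0]) + count(vs[1:], k, t)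
--     fifteens = 0
--     for k in range(1, 6):
--         fifteens += count(values, k, 15)
--     return 2 * fifteens
-- ===== Notes on version B (the rewrite author's own statement) =====
-- stated objective: alternative
-- what changed: Replaced itertools.combinations enumeration of all size-1..5 combinations with a Pascal-style recursive counter count(vs,k,t) that counts size-k subsequences summing to t without materializing any combination.
import Mathlib
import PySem

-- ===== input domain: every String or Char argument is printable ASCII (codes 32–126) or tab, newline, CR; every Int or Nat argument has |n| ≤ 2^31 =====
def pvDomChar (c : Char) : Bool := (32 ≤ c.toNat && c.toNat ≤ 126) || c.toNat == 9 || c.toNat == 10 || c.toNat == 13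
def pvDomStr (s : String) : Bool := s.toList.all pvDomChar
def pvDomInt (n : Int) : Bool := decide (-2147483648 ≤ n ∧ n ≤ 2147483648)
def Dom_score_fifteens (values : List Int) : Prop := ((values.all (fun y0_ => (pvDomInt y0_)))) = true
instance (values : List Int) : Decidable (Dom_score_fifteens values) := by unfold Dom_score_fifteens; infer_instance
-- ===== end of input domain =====

-- B replaces the combinations enumeration by a Pascal-style recursive subset counter (alternative decomposition, same asymptotic cost).

-- ===== PORT A =====
-- itertools.combinations(values, k): lexicographic by index, exact transliteration
def pyCombos (k : Nat) (vs : List Int) : List (List Int) :=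
  match k, vs with
  | 0, _ => [[]]
  | _ + 1, [] => []
  | k + 1, x :: xs => (pyCombos k xs).map (x :: ·) ++ pyCombos (k + 1) xs

def score_fifteens (values : List Int) : Int :=
  let fifteens : Int :=
    (PySem.List.pyRange 1 6 1).foldl (fun acc comboLen =>
      (pyCombos comboLen.toNat values).foldl
        (fun acc combo => if combo.sum = 15 then acc + 1 else acc) acc) 0
  2 * fifteens

-- ===== PORT B =====
-- count(vs, k, t): number of size-k subsequences of vs summing to t
def altCount (vs : List Int) (k : Nat) (t : Int) : Int :=
  match k, vs with
  | 0, _ => if t = 0 then 1 else 0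
  | _ + 1, [] => 0
  | k + 1, x :: xs => altCount xs k (t - x) + altCount xs (k + 1) t

def score_fifteens_alt (values : List Int) : Int :=
  let fifteens : Int :=
    (PySem.List.pyRange 1 6 1).foldl (fun acc k => acc + altCount values k.toNat 15) 0
  2 * fifteens

-- ===== PRECONDITION & SPEC =====
def Spec_score_fifteens (values : List Int) (out : Int) : Prop := out = score_fifteens_alt values
instance (values : List Int) (out : Int) : Decidable (Spec_score_fifteens values out) := by unfold Spec_score_fifteens; infer_instance

-- ===== CLAIM (what is proved, stated in full; the proofs are below) =====
def Claim_equal_score_fifteens : Prop := ∀ (values : List Int), Dom_score_fifteens values → Spec_score_fifteens values (score_fifteens values)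

-- ===== LEMMAS AND PROOFS =====

-- the counting fold over the enumerated combinations equals the recursive counter
theorem foldl_pyCombos_eq_altCount (vs : List Int) :
    ∀ (k : Nat) (t acc : Int),
      (pyCombos k vs).foldl (fun acc combo => if combo.sum = t then acc + 1 else acc) acc
        = acc + altCount vs k t := by
  induction vs with
  | nil =>
    intro k t acc
    cases k with
    | zero => simp [pyCombos, altCount]; split_ifs <;> omega
    | succ k => simp [pyCombos, altCount]
  | cons x xs ih =>
    intro k t acc
    cases k with
    | zero => simp [pyCombos, altCount]; split_ifs <;> omega
    | succ k =>
      have hfun : (fun (a : Int) (c : List Int) => if (x :: c).sum = t then a + 1 else a)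
          = (fun (a : Int) (c : List Int) => if c.sum = t - x then a + 1 else a) := by
        funext a c
        simp only [List.sum_cons]
        exact if_congr (by omega) rfl rfl
      simp only [pyCombos, List.foldl_append, List.foldl_map, altCount]
      rw [hfun, ih k (t - x) acc, ih (k + 1) t]
      ring

-- ===== VERDICT (by name: the statement is the Claim_ definition above) =====
theorem score_fifteens_spec : Claim_equal_score_fifteens := by
  intro values _
  show score_fifteens values = score_fifteens_alt values
  have hr : PySem.List.pyRange 1 6 1 = [1, 2, 3, 4, 5] := by decide
  simp only [score_fifteens, score_fifteens_alt, hr, List.foldl,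
    foldl_pyCombos_eq_altCount]
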